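-- pv_equiv track=rewrite | github.com/maxmineew/Python_Basic | Module16/06_roller_skates/main.py | max_people_with_skates
-- ===== SOURCE A (Python) =====
-- def max_people_with_skates(skates, feet):
--     skates.sort()
--     feet.sort()
--
--     max_people = 0
--     i = 0
--     j = 0
--
--     while i < len(skates) and j < len(feet):
--         if skates[i] == feet[j]:
--             max_people += 1
--             i += 1
--             j += 1
--         elif skates[i] < feet[j]:
--             i += 1
--         else:
--             j += 1
--
--     return max_people
-- ===== SOURCE B (Python) =====
-- def max_people_with_skates(skates, feet):
--     # sorts kept only to reproduce A's in-place mutation of its arguments;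
--     # the count itself is computed with a dict in one pass, no merge scan
--     skates.sort()
--     feet.sort()
--
--     counts = {}
--     for s in skates:
--         counts[s] = counts.get(s, 0) + 1
--
--     total = 0
--     for f in feet:
--         if counts.get(f, 0) > 0:
--             counts[f] -= 1
--             total += 1
--     return total
-- ===== Notes on version B (the rewrite author's own statement) =====
-- stated objective: alternative
-- what changed: Replaces the two-pointer merge scan over the sorted lists with a hash-map multiset intersection: count each skate size in a dict, then decrement per foot; the sorts are kept only for A's in-place mutation side-effect.
import Mathlib
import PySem

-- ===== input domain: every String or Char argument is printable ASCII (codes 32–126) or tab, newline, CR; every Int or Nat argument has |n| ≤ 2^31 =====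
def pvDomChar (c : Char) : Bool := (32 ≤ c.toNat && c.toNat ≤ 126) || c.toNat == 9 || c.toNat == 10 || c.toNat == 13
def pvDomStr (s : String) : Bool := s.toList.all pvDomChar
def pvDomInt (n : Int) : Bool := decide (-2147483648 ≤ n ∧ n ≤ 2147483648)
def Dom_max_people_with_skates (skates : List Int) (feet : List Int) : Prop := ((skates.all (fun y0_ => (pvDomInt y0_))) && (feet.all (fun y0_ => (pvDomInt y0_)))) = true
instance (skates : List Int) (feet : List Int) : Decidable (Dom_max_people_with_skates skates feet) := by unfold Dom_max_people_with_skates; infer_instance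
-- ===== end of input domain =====

-- B replaces A's two-pointer merge over the sorted lists by a dict-based multiset
-- intersection (sorts kept only for A's in-place mutation side-effect, which this
-- equivalence — about the return value — does not model).

-- ===== PORT A =====
-- the while loop: state (i, j, max_people)
def pvALoop (ss fs : List Int) (i j : Nat) (acc : Int) : Int :=
  if h : i < ss.length ∧ j < fs.length then
    let a := (PySem.List.pyGet? ss (i : Int)).getD 0
    let b := (PySem.List.pyGet? fs (j : Int)).getD 0
    if a = b then pvALoop ss fs (i + 1) (j + 1) (acc + 1)
    else if a < b then pvALoop ss fs (i + 1) j acc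
    else pvALoop ss fs i (j + 1) acc
  else acc
termination_by (ss.length - i) + (fs.length - j)
decreasing_by all_goals omega

def max_people_with_skates (skates : List Int) (feet : List Int) : Int :=
  let ss := PySem.List.sorted skates (fun x => x) false
  let fs := PySem.List.sorted feet (fun x => x) false
  pvALoop ss fs 0 0 0

-- ===== PORT B =====
-- body of the 'for f in feet' loop; counts[f] -= 1 is exact since the guard ensures the key exists
def pvBStep (st : PySem.Dict Int Int × Int) (f : Int) : PySem.Dict Int Int × Int :=
  if st.1.getD f 0 > 0 then (st.1.insert f (st.1.getD f 0 - 1), st.2 + 1) else st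

def max_people_with_skates_alt (skates : List Int) (feet : List Int) : Int :=
  let ss := PySem.List.sorted skates (fun x => x) false
  let fs := PySem.List.sorted feet (fun x => x) false
  let counts := ss.foldl (fun c s => c.insert s (c.getD s 0 + 1)) PySem.Dict.empty
  (fs.foldl pvBStep (counts, 0)).2

-- ===== PRECONDITION & SPEC =====
def Spec_max_people_with_skates (skates : List Int) (feet : List Int) (out : Int) : Prop := out = max_people_with_skates_alt skates feet
instance (skates : List Int) (feet : List Int) (out : Int) : Decidable (Spec_max_people_with_skates skates feet out) := by unfold Spec_max_people_with_skates; infer_instance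

-- ===== CLAIM (what is proved, stated in full; the proofs are below) =====
def Claim_equal_max_people_with_skates : Prop := ∀ (skates : List Int) (feet : List Int), Dom_max_people_with_skates skates feet → Spec_max_people_with_skates skates feet (max_people_with_skates skates feet)

-- ===== LEMMAS AND PROOFS =====

-- structural form of A's two-pointer merge
def pvTP : List Int → List Int → Int
  | [], _ => 0
  | _ :: _, [] => 0
  | a :: as, b :: bs =>
    if a = b then 1 + pvTP as bs
    else if a < b then pvTP as (b :: bs)
    else pvTP (a :: as) bs

-- greedy multiset-intersection count: match each foot against the remaining skates
def pvG : List Int → List Int → Int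
  | _, [] => 0
  | ms, f :: fs => if 0 < ms.count f then 1 + pvG (ms.erase f) fs else pvG ms fs

theorem pvALoop_eq_tp (ss fs : List Int) (i j : Nat) (acc : Int) :
    pvALoop ss fs i j acc = acc + pvTP (ss.drop i) (fs.drop j) := by
  fun_induction pvALoop ss fs i j acc with
  | case1 i j acc h a b hab ih =>
      rw [ih, List.drop_eq_getElem_cons h.1, List.drop_eq_getElem_cons h.2]
      have ha : a = ss[i] := by
        simp [a, PySem.List.pyGet?_natCast, List.getElem?_eq_getElem h.1]
      have hb : b = fs[j] := by
        simp [b, PySem.List.pyGet?_natCast, List.getElem?_eq_getElem h.2]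
      rw [pvTP, if_pos (by rw [← ha, ← hb]; exact hab)]
      ring
  | case2 i j acc h a b hab hlt ih =>
      rw [ih, List.drop_eq_getElem_cons h.1, List.drop_eq_getElem_cons h.2]
      have ha : a = ss[i] := by
        simp [a, PySem.List.pyGet?_natCast, List.getElem?_eq_getElem h.1]
      have hb : b = fs[j] := by
        simp [b, PySem.List.pyGet?_natCast, List.getElem?_eq_getElem h.2]
      rw [pvTP, if_neg (by rw [← ha, ← hb]; exact hab),
        if_pos (by rw [← ha, ← hb]; exact hlt)]
  | case3 i j acc h a b hab hlt ih =>
      rw [ih, List.drop_eq_getElem_cons h.1, List.drop_eq_getElem_cons h.2]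
      have ha : a = ss[i] := by
        simp [a, PySem.List.pyGet?_natCast, List.getElem?_eq_getElem h.1]
      have hb : b = fs[j] := by
        simp [b, PySem.List.pyGet?_natCast, List.getElem?_eq_getElem h.2]
      rw [pvTP, if_neg (by rw [← ha, ← hb]; exact hab),
        if_neg (by rw [← ha, ← hb]; exact hlt)]
  | case4 i j acc h =>
      rcases Nat.lt_or_ge i ss.length with hi | hi
      · have hj : fs.length ≤ j := by omega
        rw [List.drop_eq_getElem_cons hi, List.drop_of_length_le hj, pvTP]
        ring
      · rw [List.drop_of_length_le hi]
        cases fs.drop j <;> simp [pvTP]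

theorem pvG_nil (fs : List Int) : pvG [] fs = 0 := by
  induction fs with
  | nil => rfl
  | cons f fs ih => simp [pvG, ih]

theorem pvG_cons_of_ne (a : Int) (fs : List Int) :
    ∀ ms : List Int, (∀ f ∈ fs, a ≠ f) → pvG (a :: ms) fs = pvG ms fs := by
  induction fs with
  | nil => intro ms _; rfl
  | cons f fs ih =>
      intro ms hne
      have haf : a ≠ f := hne f (List.mem_cons_self ..)
      have hc : (a :: ms).count f = ms.count f := by
        simp [haf]
      have he : (a :: ms).erase f = a :: ms.erase f :=
        List.erase_cons_tail (by simpa using haf)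
      rw [pvG, pvG, hc, he]
      split_ifs with h
      · rw [ih (ms.erase f) (fun g hg => hne g (List.mem_cons_of_mem _ hg))]
      · rw [ih ms (fun g hg => hne g (List.mem_cons_of_mem _ hg))]

theorem pvTP_eq_pvG : ∀ (ss fs : List Int),
    ss.Pairwise (· ≤ ·) → fs.Pairwise (· ≤ ·) → pvTP ss fs = pvG ss fs := by
  intro ss fs
  fun_induction pvTP ss fs with
  | case1 fs => intro _ _; rw [pvG_nil]
  | case2 a as => intro _ _; rfl
  | case3 as b bs ih =>
      intro hs hf
      rw [pvG, List.erase_cons_head,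
        if_pos (show 0 < (b :: as).count b by simp),
        ih (List.Pairwise.of_cons hs) (List.Pairwise.of_cons hf)]
  | case4 a as b bs hab hlt ih =>
      intro hs hf
      rw [ih (List.Pairwise.of_cons hs) hf]
      rw [pvG_cons_of_ne a (b :: bs) as ?_]
      intro f hfm
      rcases List.mem_cons.mp hfm with rfl | hfm
      · exact ne_of_lt hlt
      · exact ne_of_lt (lt_of_lt_of_le hlt ((List.pairwise_cons.mp hf).1 f hfm))
  | case5 a as b bs hab hlt ih =>
      intro hs hf
      rw [ih hs (List.Pairwise.of_cons hf)]
      have hnm : b ∉ a :: as := by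
        intro hm
        rcases List.mem_cons.mp hm with rfl | hm
        · omega
        · exact absurd ((List.pairwise_cons.mp hs).1 b hm) (by omega)
      conv_rhs => rw [pvG]
      rw [if_neg (by simp [List.count_eq_zero.mpr hnm])]

theorem pvCounts_getD (ss : List Int) :
    ∀ (c : PySem.Dict Int Int) (x : Int),
      (ss.foldl (fun c s => c.insert s (c.getD s 0 + 1)) c).getD x 0
        = c.getD x 0 + (ss.count x : Int) := by
  induction ss with
  | nil => intro c x; simp
  | cons s ss ih =>
      intro c x
      rw [List.foldl_cons, ih, PySem.Dict.getD_insert, List.count_cons]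
      by_cases hx : x = s
      · subst hx; simp; omega
      · rw [if_neg hx, if_neg (by simpa using Ne.symm hx)]
        push_cast
        ring

theorem pvBLoop_eq_pvG (fs : List Int) :
    ∀ (c : PySem.Dict Int Int) (ms : List Int) (t : Int),
      (∀ x, c.getD x 0 = (ms.count x : Int)) →
      (fs.foldl pvBStep (c, t)).2 = t + pvG ms fs := by
  induction fs with
  | nil => intro c ms t _; simp [pvG]
  | cons f fs ih =>
      intro c ms t hc
      rw [List.foldl_cons, pvG]
      by_cases hpos : 0 < ms.count f
      · have hstep : pvBStep (c, t) f = (c.insert f (c.getD f 0 - 1), t + 1) := by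
          unfold pvBStep
          rw [if_pos (by simp only [hc]; exact_mod_cast hpos)]
        rw [hstep, if_pos hpos,
          ih _ (ms.erase f) (t + 1) ?_]
        · ring
        · intro x
          rw [PySem.Dict.getD_insert]
          by_cases hx : x = f
          · subst hx
            rw [if_pos rfl, hc, List.count_erase_self]
            omega
          · rw [if_neg hx, hc, List.count_erase_of_ne (by simpa using hx)]
      · have hstep : pvBStep (c, t) f = (c, t) := by
          unfold pvBStep
          rw [if_neg (by simp only [hc]; exact_mod_cast hpos)]
        rw [hstep, if_neg hpos, ih c ms t hc]

-- ===== VERDICT (by name: the statement is the Claim_ definition above) =====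
theorem max_people_with_skates_spec : Claim_equal_max_people_with_skates := by
  intro skates feet _
  unfold Spec_max_people_with_skates max_people_with_skates max_people_with_skates_alt
  set ss := PySem.List.sorted skates (fun x => x) false with hss
  set fs := PySem.List.sorted feet (fun x => x) false with hfs
  have hA : pvALoop ss fs 0 0 0 = pvTP ss fs := by
    simpa using pvALoop_eq_tp ss fs 0 0 0
  have hB : (fs.foldl pvBStep
      (ss.foldl (fun c s => c.insert s (c.getD s 0 + 1)) PySem.Dict.empty, 0)).2
      = pvG ss fs := by
    simpa using pvBLoop_eq_pvG fs _ ss 0 (fun x => by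
      rw [pvCounts_getD]; simp)
  rw [hA, hB, pvTP_eq_pvG ss fs]
  · simpa using PySem.List.sorted_pairwise (key := fun x => x) (xs := skates)
  · simpa using PySem.List.sorted_pairwise (key := fun x => x) (xs := feet)
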